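-- pv_equiv track=rewrite | github.com/mallashrey/uowcapstone-g237 | capstone/views.py | calculate_candidate_score
-- ===== SOURCE A (Python) =====
-- def calculate_candidate_score(mbti_trait, skill_weightages, skills_to_mbti):
--     score = 0
--     for skill, weight in skill_weightages.items():
--       for mbti_ele in mbti_trait:
--         skill_match = skills_to_mbti.get(skill)
--         if mbti_ele == skill_match:
--             score += weight
--     return score
-- ===== SOURCE B (Python) =====
-- def calculate_candidate_score(mbti_trait, skill_weightages, skills_to_mbti):
--     trait_weight = {}
--     for skill, weight in skill_weightages.items():
--         t = skills_to_mbti.get(skill)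
--         if t is not None:
--             trait_weight[t] = trait_weight.get(t, 0) + weight
--     return sum(trait_weight.get(m, 0) for m in mbti_trait)
-- ===== Notes on version B (the rewrite author's own statement) =====
-- stated objective: faster
-- what changed: Inverts the aggregation: first groups skill weights by their mapped MBTI trait into a trait->total-weight dict, then iterates over mbti_trait summing the precomputed totals, instead of A's nested scan of mbti_trait per skill.
import Mathlib
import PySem

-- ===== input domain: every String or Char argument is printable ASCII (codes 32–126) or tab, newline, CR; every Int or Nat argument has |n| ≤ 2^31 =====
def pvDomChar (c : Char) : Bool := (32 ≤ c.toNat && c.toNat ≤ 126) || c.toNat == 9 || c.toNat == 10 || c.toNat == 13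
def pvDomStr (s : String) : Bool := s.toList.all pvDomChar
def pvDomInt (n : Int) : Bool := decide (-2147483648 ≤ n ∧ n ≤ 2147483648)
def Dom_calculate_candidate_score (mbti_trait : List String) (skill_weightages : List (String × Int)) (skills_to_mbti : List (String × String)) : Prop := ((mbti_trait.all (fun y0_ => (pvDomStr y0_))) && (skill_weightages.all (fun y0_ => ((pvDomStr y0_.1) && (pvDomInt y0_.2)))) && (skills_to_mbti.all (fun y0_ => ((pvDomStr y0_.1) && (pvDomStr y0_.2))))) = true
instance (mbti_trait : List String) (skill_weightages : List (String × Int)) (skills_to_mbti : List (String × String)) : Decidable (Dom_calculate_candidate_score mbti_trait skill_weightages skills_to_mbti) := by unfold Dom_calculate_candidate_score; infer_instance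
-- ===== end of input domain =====

-- B inverts the aggregation: it groups skill weights by mapped trait into a dict, then sums per trait occurrence (objective: faster, asymptotic).

-- ===== PORT A =====
-- literal transliteration of A: outer loop over skill_weightages.items(),
-- inner loop over mbti_trait, skills_to_mbti.get(skill) looked up inside;
-- 'mbti_ele == skill_match' with skill_match possibly None is 'get? … == some m'
def calculate_candidate_score (mbti_trait : List String) (skill_weightages : List (String × Int)) (skills_to_mbti : List (String × String)) : Int :=
  (PySem.Dict.ofList skill_weightages).items.foldl (fun score p =>
    mbti_trait.foldl (fun score mbti_ele =>
      let skill_match := (PySem.Dict.ofList skills_to_mbti).get? p.1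
      if skill_match == some mbti_ele then score + p.2 else score) score) 0

-- ===== PORT B =====
-- transliteration of Source B: build trait_weight dict (skip skills with no mapping),
-- then sum trait_weight.get(m, 0) over mbti_trait
def calculate_candidate_score_alt (mbti_trait : List String) (skill_weightages : List (String × Int)) (skills_to_mbti : List (String × String)) : Int :=
  let s2m := PySem.Dict.ofList skills_to_mbti
  let trait_weight := (PySem.Dict.ofList skill_weightages).items.foldl (fun tw p =>
    match s2m.get? p.1 with
    | none => tw
    | some t => tw.insert t (tw.getD t 0 + p.2)) (PySem.Dict.empty)
  mbti_trait.foldl (fun acc m => acc + trait_weight.getD m 0) 0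

-- ===== PRECONDITION & SPEC =====
def Spec_calculate_candidate_score (mbti_trait : List String) (skill_weightages : List (String × Int)) (skills_to_mbti : List (String × String)) (out : Int) : Prop := out = calculate_candidate_score_alt mbti_trait skill_weightages skills_to_mbti
instance (mbti_trait : List String) (skill_weightages : List (String × Int)) (skills_to_mbti : List (String × String)) (out : Int) : Decidable (Spec_calculate_candidate_score mbti_trait skill_weightages skills_to_mbti out) := by unfold Spec_calculate_candidate_score; infer_instance

-- ===== CLAIM (what is proved, stated in full; the proofs are below) =====
def Claim_equal_calculate_candidate_score : Prop := ∀ (mbti_trait : List String) (skill_weightages : List (String × Int)) (skills_to_mbti : List (String × String)), Dom_calculate_candidate_score mbti_trait skill_weightages skills_to_mbti → Spec_calculate_candidate_score mbti_trait skill_weightages skills_to_mbti (calculate_candidate_score mbti_trait skill_weightages skills_to_mbti)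

-- ===== LEMMAS AND PROOFS =====

-- the total weight of skills in xs that map (through g) to trait t
def pvW (g : String → Option String) (xs : List (String × Int)) (t : String) : Int :=
  (xs.map (fun p => if g p.1 = some t then p.2 else 0)).sum

-- B's dict build: getD of the resulting dict is the initial getD plus pvW
theorem getD_build (g : String → Option String) (xs : List (String × Int))
    (d : PySem.Dict String Int) (t : String) :
    (xs.foldl (fun tw p =>
      match g p.1 with
      | none => tw
      | some u => tw.insert u (tw.getD u 0 + p.2)) d).getD t 0
      = d.getD t 0 + pvW g xs t := by
  induction xs generalizing d with
  | nil => simp [pvW]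
  | cons p rest ih =>
    simp only [List.foldl_cons, pvW, List.map_cons, List.sum_cons]
    cases h : g p.1 with
    | none => simp [h, ih, pvW]
    | some u =>
      rw [ih]
      by_cases ht : t = u
      · subst ht; simp [h, PySem.Dict.getD_insert, pvW]; ring
      · have hne : g p.1 ≠ some t := by rw [h]; intro e; exact ht (Option.some.inj e).symm
        simp [PySem.Dict.getD_insert, ht, pvW]
        exact fun e => absurd (h.trans (congrArg some e)) hne

-- A's inner loop over mbti_trait adds w once per matching element
theorem inner_loop_eq (v : Option String) (w : Int) (mbti : List String) (s : Int) :
    mbti.foldl (fun score m => if v == some m then score + w else score) s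
      = s + w * (match v with | none => 0 | some t => (mbti.count t : Int)) := by
  induction mbti generalizing s with
  | nil => cases v <;> simp
  | cons m rest ih =>
    cases v with
    | none => simpa using ih s
    | some t =>
      simp only [List.foldl_cons, List.count_cons, ih]
      by_cases h : t = m
      · simp [h]; ring
      · have hb : (some t == some m) = false := by
          simp [beq_eq_false_iff_ne, h]
        have hc : (m == t) = false := by
          simp [beq_eq_false_iff_ne]; exact fun e => h e.symm
        simp [hb, hc]

-- summing the per-match indicator over mbti collapses to w * count
theorem sum_indicator (v : Option String) (w : Int) (mbti : List String) :
    (mbti.map (fun m => if v = some m then w else 0)).sum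
      = w * (match v with | none => 0 | some t => (mbti.count t : Int)) := by
  induction mbti with
  | nil => cases v <;> simp
  | cons m rest ih =>
    cases v with
    | none => simpa using ih
    | some t =>
      simp only [List.map_cons, List.sum_cons, List.count_cons, ih]
      by_cases h : t = m
      · have hc : (m == t) = true := by simp [h]
        simp [h, hc]; ring
      · have hne : ¬ (some t = some m) := by intro e; exact h (Option.some.inj e)
        have hc : (m == t) = false := by
          simp [beq_eq_false_iff_ne]; exact fun e => h e.symm
        simp [hne, hc]

-- sum over traits of pvW equals sum over skills of weight*count (swap of summation order)
theorem sum_swap (g : String → Option String) (xs : List (String × Int)) (mbti : List String) :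
    (mbti.map (fun m => pvW g xs m)).sum
      = (xs.map (fun p => p.2 * (match g p.1 with
          | none => 0
          | some t => (mbti.count t : Int)))).sum := by
  induction xs with
  | nil => simp [pvW]
  | cons p rest ih =>
    have split : (mbti.map (fun m => pvW g (p :: rest) m)).sum
        = (mbti.map (fun m => if g p.1 = some m then p.2 else 0)).sum
          + (mbti.map (fun m => pvW g rest m)).sum := by
      induction mbti with
      | nil => simp
      | cons m ms ihm =>
        simp only [List.map_cons, List.sum_cons, ihm]
        simp [pvW]
        ring
    rw [split, ih, sum_indicator]
    simp only [List.map_cons, List.sum_cons]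

-- ===== VERDICT (by name: the statement is the Claim_ definition above) =====
theorem calculate_candidate_score_spec : Claim_equal_calculate_candidate_score := by
  intro mbti skw s2m _
  unfold Spec_calculate_candidate_score calculate_candidate_score calculate_candidate_score_alt
  set g := fun k => (PySem.Dict.ofList s2m).get? k with hg
  set xs := (PySem.Dict.ofList skw).items with hxs
  -- A side: each outer step adds weight * count (or 0)
  have hA : xs.foldl (fun score p =>
      mbti.foldl (fun score m =>
        if g p.1 == some m then score + p.2 else score) score) 0
      = (xs.map (fun p => p.2 * (match g p.1 with
          | none => 0
          | some t => (mbti.count t : Int)))).sum := by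
    rw [show (fun (score : Int) (p : String × Int) =>
        mbti.foldl (fun score m =>
          if g p.1 == some m then score + p.2 else score) score)
      = (fun score p => score + p.2 * (match g p.1 with
          | none => 0
          | some t => (mbti.count t : Int))) from
      funext fun score => funext fun p => inner_loop_eq (g p.1) p.2 mbti score]
    rw [PySem.List.foldl_add]
    simp
  -- B side: foldl over mbti of getD of the built dict
  have hB : mbti.foldl (fun acc m =>
      acc + (xs.foldl (fun tw p =>
        match g p.1 with
        | none => tw
        | some t => tw.insert t (tw.getD t 0 + p.2)) PySem.Dict.empty).getD m 0) 0
      = (mbti.map (fun m => pvW g xs m)).sum := by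
    rw [PySem.List.foldl_add]
    simp only [zero_add]
    congr 1
    apply List.map_congr_left
    intro m _
    rw [getD_build g xs PySem.Dict.empty m]
    simp [PySem.Dict.getD_empty]
  show xs.foldl (fun score p =>
      mbti.foldl (fun score m =>
        if g p.1 == some m then score + p.2 else score) score) 0
    = mbti.foldl (fun acc m =>
      acc + (xs.foldl (fun tw p =>
        match g p.1 with
        | none => tw
        | some t => tw.insert t (tw.getD t 0 + p.2)) PySem.Dict.empty).getD m 0) 0
  rw [hA, ← sum_swap g xs mbti, ← hB]
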